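-- pv_equiv track=rewrite | github.com/JoonHyeok-hozy-Kim/algorithm_study | BaekJoon/Solutions/Week6/MainQuestions/Sol_10_221109_1802.py | reset_type_two
-- ===== SOURCE A (Python) =====
-- def reset_type_two(curr):
--     idx = 0
--     result = []
--     cnt = 0
--     while idx < len(curr):
--         if (cnt % 2 == 0 and curr[idx] == '0') or (cnt % 2 == 1 and curr[idx] == '1'):
--             if idx == len(curr) -1:
--                 break
--             else:
--                 idx += 1
--                 cnt += 1
--         else:
--             return False, None
--
--         if idx == len(curr):
--             return False, None
--         else:
--             result.append(curr[idx])
--             idx += 1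
--
--     return True, ''.join(result)
-- ===== SOURCE B (Python) =====
-- def reset_type_two(curr):
--     evens = curr[::2]
--     odds = curr[1::2]
--     for i, c in enumerate(evens):
--         expected = '0' if i % 2 == 0 else '1'
--         if c != expected:
--             return False, None
--     return True, odds
-- ===== Notes on version B (the rewrite author's own statement) =====
-- stated objective: simpler
-- what changed: Replaced A's single interleaved index/counter state machine (stepping two indices per iteration with an unreachable mid-loop guard) by slicing the string into even- and odd-position slices, validating the even slice against the alternating 0/1 pattern, and returning the odd slice directly.
import Mathlib
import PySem

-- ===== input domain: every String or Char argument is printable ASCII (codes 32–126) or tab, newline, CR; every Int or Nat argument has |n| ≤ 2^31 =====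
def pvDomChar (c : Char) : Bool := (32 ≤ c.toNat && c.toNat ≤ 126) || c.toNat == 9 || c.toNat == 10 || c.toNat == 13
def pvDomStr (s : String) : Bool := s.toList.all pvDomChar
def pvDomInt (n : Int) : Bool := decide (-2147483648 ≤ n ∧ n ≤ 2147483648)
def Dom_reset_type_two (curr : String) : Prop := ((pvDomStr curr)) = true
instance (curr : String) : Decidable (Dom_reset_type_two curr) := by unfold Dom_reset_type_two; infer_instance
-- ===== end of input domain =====

-- B replaces A's interleaved index/counter state machine with slicing into even/odd
-- positions, validating the even slice and returning the odd slice (objective: simpler).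

-- ===== PORT A =====
-- the while loop of A: state idx, cnt, result; indices into the full list l
def pvALoop (l : List Char) (idx cnt : Nat) (result : List Char) : Bool × Option String :=
  if h : idx < l.length then
    if (cnt % 2 == 0 && l[idx] == '0') || (cnt % 2 == 1 && l[idx] == '1') then
      if idx == l.length - 1 then
        (true, some (String.ofList result))            -- break, then return True, ''.join(result)
      else
        -- idx += 1; cnt += 1; then the unreachable guard 'if idx == len(curr)'
        if _hx : idx + 1 = l.length then (false, none)
        else
          have h2 : idx + 1 < l.length := by omega
          pvALoop l (idx + 2) (cnt + 1) (result ++ [l[idx + 1]])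
    else (false, none)
  else (true, some (String.ofList result))
termination_by l.length - idx

def reset_type_two (curr : String) : Bool × Option String :=
  pvALoop curr.toList 0 0 []

-- ===== PORT B =====
-- curr[::2] on a char list (exact hand port of the step-2 slice from index 0)
def pvEveryOther : List Char → List Char
  | [] => []
  | [a] => [a]
  | a :: _ :: t => a :: pvEveryOther t

-- the validation loop of B: c must be '0' at even i, '1' at odd i
def pvCheckEvens : List Char → Nat → Bool
  | [], _ => true
  | c :: rest, i => (if i % 2 == 0 then c == '0' else c == '1') && pvCheckEvens rest (i + 1)

def reset_type_two_alt (curr : String) : Bool × Option String :=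
  let l := curr.toList
  let evens := pvEveryOther l
  let odds := pvEveryOther (l.drop 1)            -- curr[1::2]
  if pvCheckEvens evens 0 then (true, some (String.ofList odds)) else (false, none)

-- ===== PRECONDITION & SPEC =====
def Spec_reset_type_two (curr : String) (out : Bool × Option String) : Prop := out = reset_type_two_alt curr
instance (curr : String) (out : Bool × Option String) : Decidable (Spec_reset_type_two curr out) := by unfold Spec_reset_type_two; infer_instance

-- ===== CLAIM (what is proved, stated in full; the proofs are below) =====
def Claim_equal_reset_type_two : Prop := ∀ (curr : String), Dom_reset_type_two curr → Spec_reset_type_two curr (reset_type_two curr)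

-- ===== LEMMAS AND PROOFS =====

theorem pvEveryOther_cons (x : Char) (t : List Char) :
    pvEveryOther (x :: t) = x :: pvEveryOther (t.drop 1) := by
  cases t <;> simp [pvEveryOther]

theorem pvALoop_eq : (rest l : List Char) → (idx cnt : Nat) → (res : List Char) →
    l.drop idx = rest →
    pvALoop l idx cnt res =
      (if pvCheckEvens (pvEveryOther rest) cnt
       then (true, some (String.ofList (res ++ pvEveryOther (rest.drop 1))))
       else (false, none))
  | [], l, idx, cnt, res, hd => by
    have hlen : l.length ≤ idx := by
      by_contra hlt
      have := congrArg List.length hd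
      simp at this
      omega
    rw [pvALoop]
    simp [Nat.not_lt.mpr hlen, pvEveryOther, pvCheckEvens]
  | [a], l, idx, cnt, res, hd => by
    have hlen : l.length = idx + 1 := by
      have := congrArg List.length hd
      simp at this
      by_cases hlt : idx < l.length
      · omega
      · rw [List.drop_eq_nil_of_le (Nat.not_lt.mp hlt)] at hd; simp at hd
    have hlt : idx < l.length := by omega
    have ha : l[idx]'hlt = a := by
      have : (l.drop idx)[0]'(by simp [hd]) = a := by simp [hd]
      simpa using this
    rw [pvALoop]
    simp only [dif_pos, ha, hlen]
    have hidx : idx = idx + 1 - 1 := by omega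
    rcases Nat.mod_two_eq_zero_or_one cnt with hc | hc <;>
      simp [hc, pvEveryOther, pvCheckEvens, ← hidx]
  | a :: b :: t, l, idx, cnt, res, hd => by
    have hlen : l.length = idx + (t.length + 2) := by
      have := congrArg List.length hd
      simp at this
      by_cases hlt : idx < l.length
      · omega
      · rw [List.drop_eq_nil_of_le (Nat.not_lt.mp hlt)] at hd; simp at hd
    have hlt : idx < l.length := by omega
    have hlt1 : idx + 1 < l.length := by omega
    have ha : l[idx]'hlt = a := by
      have : (l.drop idx)[0]'(by simp [hd]) = a := by simp [hd]
      simpa using this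
    have hb : l[idx + 1]'hlt1 = b := by
      have : (l.drop idx)[1]'(by simp [hd]) = b := by simp [hd]
      simpa using this
    have hdrop : l.drop (idx + 2) = t := by
      have : (l.drop idx).drop 2 = t := by simp [hd]
      simpa [List.drop_drop, Nat.add_comm] using this
    have hne : ¬ (idx = l.length - 1) := by omega
    have hne1 : ¬ (idx + 1 = l.length) := by omega
    rw [pvALoop]
    simp only [hlt, dif_pos, ha, hb, hne1]
    rw [pvALoop_eq t l (idx + 2) (cnt + 1) (res ++ [b]) hdrop]
    have hodds : pvEveryOther (b :: t) = b :: pvEveryOther (t.drop 1) := pvEveryOther_cons b t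
    rcases Nat.mod_two_eq_zero_or_one cnt with hc | hc <;>
      simp [hc, pvEveryOther, pvCheckEvens, hodds] <;>
      by_cases hae : a = '0' <;> by_cases hae1 : a = '1' <;> simp_all

-- ===== VERDICT (by name: the statement is the Claim_ definition above) =====
theorem reset_type_two_spec : Claim_equal_reset_type_two := by
  intro curr _
  unfold Spec_reset_type_two reset_type_two reset_type_two_alt
  rw [pvALoop_eq curr.toList curr.toList 0 0 [] (by simp)]
  split <;> simp_all
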